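-- pv_equiv track=rewrite | github.com/Fliegenbart/ViralFlux-Media-Intelligence | backend/app/services/media/semantic_contracts.py | infer_feature_families
-- ===== SOURCE A (Python) =====
-- from typing import Any
--
-- _FEATURE_FAMILY_RULES: tuple[tuple[str, tuple[str, ...]], ...] = (
--     ("AMELAG-Lags", ("amelag_",)),
--     ("Cross-Disease-Lags", ("xdisease_",)),
--     ("SurvStat-Lags", ("survstat_",)),
--     ("Google Trends", ("trends_score",)),
--     ("Schulferien", ("schulferien",)),
--     ("Interne Historie", ("lab_",)),
--     ("Wetter-Kontext", ("weather_", "temperatur", "luftfeuchtigkeit", "humidity", "uv_")),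
-- )
--
-- def infer_feature_families(feature_names: list[Any] | tuple[Any, ...] | set[Any] | None) -> list[str]:
--     normalized = {
--         str(name).strip().lower()
--         for name in (feature_names or [])
--         if str(name).strip()
--     }
--     families: list[str] = []
--     for label, prefixes in _FEATURE_FAMILY_RULES:
--         if any(
--             feature == prefix or feature.startswith(prefix)
--             for prefix in prefixes
--             for feature in normalized
--         ):
--             families.append(label)
--     return families
-- ===== SOURCE B (Python) =====
-- _FEATURE_FAMILY_RULES: tuple[tuple[str, tuple[str, ...]], ...] = (
--     ("AMELAG-Lags", ("amelag_",)),
--     ("Cross-Disease-Lags", ("xdisease_",)),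
--     ("SurvStat-Lags", ("survstat_",)),
--     ("Google Trends", ("trends_score",)),
--     ("Schulferien", ("schulferien",)),
--     ("Interne Historie", ("lab_",)),
--     ("Wetter-Kontext", ("weather_", "temperatur", "luftfeuchtigkeit", "humidity", "uv_")),
-- )
--
-- def infer_feature_families(feature_names):
--     # One pass over the features: collect the labels whose rule matches, then
--     # emit the matched labels in rule order.
--     matched = set()
--     for name in (feature_names or []):
--         feat = str(name).strip().lower()
--         if not feat:
--             continue
--         for label, prefixes in _FEATURE_FAMILY_RULES:
--             if any(feat.startswith(p) for p in prefixes):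
--                 matched.add(label)
--     return [label for label, _ in _FEATURE_FAMILY_RULES if label in matched]
-- ===== Notes on version B (the rewrite author's own statement) =====
-- stated objective: alternative
-- what changed: Instead of A's seven per-rule scans over the normalized feature set, B makes one pass over the features accumulating the matching family labels into a set, then emits the matched labels in rule order.
import Mathlib
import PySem

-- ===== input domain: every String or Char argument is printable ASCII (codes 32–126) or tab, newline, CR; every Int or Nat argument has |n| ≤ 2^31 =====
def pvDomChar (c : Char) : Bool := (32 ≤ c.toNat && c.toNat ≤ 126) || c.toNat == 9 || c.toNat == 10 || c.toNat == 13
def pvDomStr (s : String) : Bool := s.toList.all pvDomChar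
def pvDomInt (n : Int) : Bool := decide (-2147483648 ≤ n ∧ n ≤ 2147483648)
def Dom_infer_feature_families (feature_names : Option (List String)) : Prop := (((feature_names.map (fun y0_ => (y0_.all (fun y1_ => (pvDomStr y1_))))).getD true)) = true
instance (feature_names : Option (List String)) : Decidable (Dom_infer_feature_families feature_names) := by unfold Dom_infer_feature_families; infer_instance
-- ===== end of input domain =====

-- B replaces A's seven per-rule scans over the normalized set with one pass over the
-- features that accumulates matched labels into a set, then emits labels in rule order
-- (objective: alternative decomposition; same asymptotic cost).

-- module-level rule table shared by both programs
def pvFamilyRules : List (String × List String) :=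
  [("AMELAG-Lags", ["amelag_"]),
   ("Cross-Disease-Lags", ["xdisease_"]),
   ("SurvStat-Lags", ["survstat_"]),
   ("Google Trends", ["trends_score"]),
   ("Schulferien", ["schulferien"]),
   ("Interne Historie", ["lab_"]),
   ("Wetter-Kontext", ["weather_", "temperatur", "luftfeuchtigkeit", "humidity", "uv_"])]

-- ===== PORT A =====
def infer_feature_families (feature_names : Option (List String)) : List String :=
  let names := feature_names.getD []
  -- set comprehension: {str(name).strip().lower() for name in … if str(name).strip()}
  let normalized : PySem.Set String :=
    PySem.Set.ofList
      ((names.filter (fun name => PySem.Str.strip name ≠ "")).map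
        (fun name => PySem.Str.lower (PySem.Str.strip name)))
  pvFamilyRules.foldl
    (fun families lp =>
      if lp.2.any (fun pfx =>
            normalized.any (fun feature => feature == pfx || PySem.Str.startswith feature pfx))
      then families ++ [lp.1] else families) []

-- ===== PORT B =====
def infer_feature_families_alt (feature_names : Option (List String)) : List String :=
  let matched : PySem.Set String :=
    (feature_names.getD []).foldl
      (fun m name =>
        let feat := PySem.Str.lower (PySem.Str.strip name)
        if feat = "" then m
        else pvFamilyRules.foldl
          (fun m lp =>
            if lp.2.any (fun p => PySem.Str.startswith feat p) then PySem.Set.add m lp.1 else m)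
          m)
      PySem.Set.empty
  (pvFamilyRules.filter (fun lp => PySem.Set.contains matched lp.1)).map (fun lp => lp.1)

-- ===== PRECONDITION & SPEC =====
def Spec_infer_feature_families (feature_names : Option (List String)) (out : List String) : Prop := out = infer_feature_families_alt feature_names
instance (feature_names : Option (List String)) (out : List String) : Decidable (Spec_infer_feature_families feature_names out) := by unfold Spec_infer_feature_families; infer_instance

-- ===== CLAIM (what is proved, stated in full; the proofs are below) =====
def Claim_equal_infer_feature_families : Prop := ∀ (feature_names : Option (List String)), Dom_infer_feature_families feature_names → Spec_infer_feature_families feature_names (infer_feature_families feature_names)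

-- ===== LEMMAS AND PROOFS =====

theorem pv_lower_eq_empty (s : String) : PySem.Str.lower s = "" ↔ s = "" := by
  rw [← String.toList_inj]
  simp [PySem.Str.lower, PySem.Chars.lower]

theorem pv_eq_or_startswith (f p : String) :
    (f == p || PySem.Str.startswith f p) = PySem.Str.startswith f p := by
  by_cases h : f = p
  · subst h; simp [PySem.Str.startswith, PySem.Chars.startswith]
  · simp [h]

theorem pv_contains_iff (s : PySem.Set String) (x : String) :
    PySem.Set.contains s x = true ↔ x ∈ s := by
  simp [PySem.Set.contains]

-- any over set(xs) = any over xs (the condition is membership-determined)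
theorem pv_any_ofList {q : String → Bool} (l : List String) :
    (PySem.Set.ofList l).any q = l.any q := by
  rw [Bool.eq_iff_iff]
  simp only [List.any_eq_true]
  constructor
  · rintro ⟨x, hx, hq⟩; exact ⟨x, (PySem.Set.mem_ofList l x).mp hx, hq⟩
  · rintro ⟨x, hx, hq⟩; exact ⟨x, (PySem.Set.mem_ofList l x).mpr hx, hq⟩

-- membership in B's inner fold over the rules (c : the per-rule match test)
theorem pv_mem_inner (c : String × List String → Bool) (rules : List (String × List String))
    (m : PySem.Set String) (x : String) :
    x ∈ rules.foldl (fun m lp => if c lp then PySem.Set.add m lp.1 else m) m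
      ↔ x ∈ m ∨ ∃ lp ∈ rules, c lp ∧ x = lp.1 := by
  induction rules generalizing m with
  | nil => simp
  | cons r rs ih =>
    simp only [List.foldl_cons]
    by_cases h : c r
    · rw [if_pos h, ih]
      simp only [PySem.Set.mem_add]
      constructor
      · rintro (⟨hm | he⟩ | ⟨lp, hlp, hh, hx⟩)
        · exact Or.inl hm
        · exact Or.inr ⟨r, List.mem_cons_self .., h, he⟩
        · exact Or.inr ⟨lp, List.mem_cons_of_mem _ hlp, hh, hx⟩
      · rintro (hm | ⟨lp, hlp, hh, hx⟩)
        · exact Or.inl (Or.inl hm)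
        · rcases List.mem_cons.mp hlp with rfl | hlp
          · exact Or.inl (Or.inr hx)
          · exact Or.inr ⟨lp, hlp, hh, hx⟩
    · rw [if_neg h, ih]
      constructor
      · rintro (hm | ⟨lp, hlp, hh, hx⟩)
        · exact Or.inl hm
        · exact Or.inr ⟨lp, List.mem_cons_of_mem _ hlp, hh, hx⟩
      · rintro (hm | ⟨lp, hlp, hh, hx⟩)
        · exact Or.inl hm
        · rcases List.mem_cons.mp hlp with rfl | hlp
          · exact absurd hh h
          · exact Or.inr ⟨lp, hlp, hh, hx⟩

-- membership in B's matched set, over the whole input list (stated with B's literal loop body)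
theorem pv_mem_matched (names : List String) (m : PySem.Set String) (x : String) :
    x ∈ names.foldl
        (fun m name =>
          let feat := PySem.Str.lower (PySem.Str.strip name)
          if feat = "" then m
          else pvFamilyRules.foldl
            (fun m lp =>
              if lp.2.any (fun p => PySem.Str.startswith feat p) then PySem.Set.add m lp.1 else m)
            m) m
      ↔ x ∈ m ∨ ∃ name ∈ names, PySem.Str.lower (PySem.Str.strip name) ≠ "" ∧
          ∃ lp ∈ pvFamilyRules,
            lp.2.any (fun p => PySem.Str.startswith (PySem.Str.lower (PySem.Str.strip name)) p) ∧
            x = lp.1 := by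
  induction names generalizing m with
  | nil => simp
  | cons n ns ih =>
    simp only [List.foldl_cons]
    by_cases h : PySem.Str.lower (PySem.Str.strip n) = ""
    · simp only [h, if_pos, ih]
      constructor
      · rintro (hm | ⟨name, hn, hne, rest⟩)
        · exact Or.inl hm
        · exact Or.inr ⟨name, List.mem_cons_of_mem _ hn, hne, rest⟩
      · rintro (hm | ⟨name, hn, hne, rest⟩)
        · exact Or.inl hm
        · rcases List.mem_cons.mp hn with rfl | hn
          · exact absurd h hne
          · exact Or.inr ⟨name, hn, hne, rest⟩
    · simp only [if_neg h, ih,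
        pv_mem_inner (fun lp =>
          lp.2.any (fun p => PySem.Str.startswith (PySem.Str.lower (PySem.Str.strip n)) p))]
      constructor
      · rintro ((hm | rest) | ⟨name, hn, hne, rest⟩)
        · exact Or.inl hm
        · exact Or.inr ⟨n, List.mem_cons_self .., h, rest⟩
        · exact Or.inr ⟨name, List.mem_cons_of_mem _ hn, hne, rest⟩
      · rintro (hm | ⟨name, hn, hne, rest⟩)
        · exact Or.inl (Or.inl hm)
        · rcases List.mem_cons.mp hn with rfl | hn
          · exact Or.inl (Or.inr rest)
          · exact Or.inr ⟨name, hn, hne, rest⟩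

-- the rule labels are pairwise distinct, so a label identifies its rule
theorem pv_labels_nodup : (pvFamilyRules.map Prod.fst).Nodup := by decide

theorem pv_label_unique {lp lp' : String × List String}
    (h : lp ∈ pvFamilyRules) (h' : lp' ∈ pvFamilyRules) (he : lp'.1 = lp.1) : lp' = lp := by
  obtain ⟨i, hi, hei⟩ := List.getElem_of_mem h'
  obtain ⟨j, hj, hej⟩ := List.getElem_of_mem h
  have hmap : (pvFamilyRules.map Prod.fst)[i]'(by simpa using hi)
      = (pvFamilyRules.map Prod.fst)[j]'(by simpa using hj) := by
    simp [hei, hej, he]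
  have hij : i = j := by
    have := (List.Nodup.getElem_inj_iff pv_labels_nodup).mp hmap
    simpa using this
  subst hij
  rw [← hei]; exact hej

-- ===== VERDICT (by name: the statement is the Claim_ definition above) =====
theorem infer_feature_families_spec : Claim_equal_infer_feature_families := by
  intro feature_names _
  unfold Spec_infer_feature_families infer_feature_families infer_feature_families_alt
  rw [PySem.List.foldl_append_if]
  simp only [List.nil_append]
  apply congrArg (List.map _)
  apply List.filter_congr
  intro lp hlp
  rw [Bool.eq_iff_iff, pv_contains_iff, pv_mem_matched]
  simp only [PySem.Set.empty, List.not_mem_nil, false_or]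
  constructor
  · intro hA
    obtain ⟨p, hp, hany⟩ := List.any_eq_true.mp hA
    rw [pv_any_ofList] at hany
    obtain ⟨f, hf, hsw⟩ := List.any_eq_true.mp hany
    obtain ⟨name, hnm, rfl⟩ := List.mem_map.mp hf
    have hn := List.mem_filter.mp hnm
    refine ⟨name, hn.1, ?_, lp, hlp, ?_, rfl⟩
    · intro h0
      exact (by simpa using hn.2 : PySem.Str.strip name ≠ "") ((pv_lower_eq_empty _).mp h0)
    · rw [pv_eq_or_startswith] at hsw
      exact List.any_eq_true.mpr ⟨p, hp, hsw⟩
  · rintro ⟨name, hn, hne, lp', hlp', hh, hx⟩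
    have : lp' = lp := pv_label_unique hlp hlp' hx.symm
    subst this
    obtain ⟨p, hp, hsw⟩ := List.any_eq_true.mp hh
    refine List.any_eq_true.mpr ⟨p, hp, ?_⟩
    rw [pv_any_ofList]
    refine List.any_eq_true.mpr ⟨PySem.Str.lower (PySem.Str.strip name), ?_, ?_⟩
    · exact List.mem_map.mpr ⟨name, List.mem_filter.mpr ⟨hn, by
        simpa using fun h0 => hne ((pv_lower_eq_empty _).mpr h0)⟩, rfl⟩
    · rw [pv_eq_or_startswith]; exact hsw
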